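-- pv_equiv track=rewrite | github.com/lzw150/DIA-BERT | src/identify_v8/score_predict_thread.py | find_middle_of_longest_subarray
-- ===== SOURCE A (Python) =====
-- def find_middle_of_longest_subarray(subarray):
--     if not subarray:
--         return None
--
--     subarray.sort()
--
--     max_length = 0
--     current_length = 0
--     start_index = 0
--     best_start_index = 0
--
--     for i in range(len(subarray)):
--         if i == 0 or subarray[i] == subarray[i - 1] + 1:
--             current_length += 1
--         else:
--             if current_length > max_length:
--                 max_length = current_length
--                 best_start_index = start_index
--             current_length = 1
--             start_index = i
--
--     if current_length > max_length:
--         max_length = current_length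
--         best_start_index = start_index
--
--     longest_subarray = subarray[best_start_index:best_start_index + max_length]
--     middle_index = (len(longest_subarray) - 1) // 2
--     return longest_subarray[middle_index]
-- ===== SOURCE B (Python) =====
-- def find_middle_of_longest_subarray(subarray):
--     if not subarray:
--         return None
--     subarray.sort()
--     n = len(subarray)
--     starts = [i for i in range(n) if i == 0 or subarray[i] != subarray[i - 1] + 1]
--     bounds = starts + [n]
--     runs = [(bounds[k], bounds[k + 1] - bounds[k]) for k in range(len(starts))]
--     start, length = max(runs, key=lambda run: run[1])
--     return subarray[start + (length - 1) // 2]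
-- ===== Notes on version B (the rewrite author's own statement) =====
-- stated objective: simpler
-- what changed: Replaces A's stateful scan (running length / best-start accumulators updated in a loop, with the update logic duplicated after the loop, then a slice) by a declarative decomposition: a comprehension collects the run-boundary indices of the sorted list, runs become (start, length) pairs from adjacent boundaries, max(..., key=length) picks the first longest run, and the middle element is indexed directly.
import Mathlib
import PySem

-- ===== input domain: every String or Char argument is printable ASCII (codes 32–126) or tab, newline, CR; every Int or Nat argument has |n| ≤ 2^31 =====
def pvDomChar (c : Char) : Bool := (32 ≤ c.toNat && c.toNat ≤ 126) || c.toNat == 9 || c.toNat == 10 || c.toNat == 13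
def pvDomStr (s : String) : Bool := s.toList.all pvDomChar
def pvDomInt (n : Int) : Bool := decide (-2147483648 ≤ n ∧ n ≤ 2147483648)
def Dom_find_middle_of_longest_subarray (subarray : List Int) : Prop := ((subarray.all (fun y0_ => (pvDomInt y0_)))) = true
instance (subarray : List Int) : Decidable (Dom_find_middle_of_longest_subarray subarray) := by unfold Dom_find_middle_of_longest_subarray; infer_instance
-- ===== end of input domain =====

-- B replaces A's stateful best-so-far loop (with its duplicated post-loop flush and slice) by a
-- declarative decomposition: collect run-boundary indices, form (start, length) pairs, take the
-- first longest with max(key=length), index the middle directly. Same values everywhere; both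
-- versions sort their argument in place.

-- ===== PORT A =====
def find_middle_of_longest_subarray (subarray : List Int) : Option Int :=
  if subarray = [] then none
  else
    let s := PySem.List.sorted subarray (fun x => x) false
    let st := (PySem.List.pyRange 0 (PySem.List.len s) 1).foldl
      (fun (st : Int × Int × Int × Int) i =>
        if i = 0 ∨ PySem.List.pyGetD s i 0 = PySem.List.pyGetD s (i - 1) 0 + 1 then
          (st.1, st.2.1 + 1, st.2.2.1, st.2.2.2)
        else
          if st.2.1 > st.1 then (st.2.1, 1, i, st.2.2.1)
          else (st.1, 1, i, st.2.2.2))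
      (0, 0, 0, 0)
    let maxL := if st.2.1 > st.1 then st.2.1 else st.1
    let bestI := if st.2.1 > st.1 then st.2.2.1 else st.2.2.2
    let longest := PySem.List.slice s (some bestI) (some (bestI + maxL))
    PySem.List.pyGet? longest (PySem.Int.floordiv (PySem.List.len longest - 1) 2)

-- ===== PORT B =====
def find_middle_of_longest_subarray_alt (subarray : List Int) : Option Int :=
  if subarray = [] then none
  else
    let s := PySem.List.sorted subarray (fun x => x) false
    let n := PySem.List.len s
    let starts := (PySem.List.pyRange 0 n 1).filter
      (fun i => decide (i = 0 ∨ ¬ PySem.List.pyGetD s i 0 = PySem.List.pyGetD s (i - 1) 0 + 1))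
    let bounds := starts ++ [n]
    let runsList := (PySem.List.pyRange 0 (PySem.List.len starts) 1).map
      (fun k => (PySem.List.pyGetD bounds k 0,
                 PySem.List.pyGetD bounds (k + 1) 0 - PySem.List.pyGetD bounds k 0))
    match PySem.List.max? runsList (fun run => run.2) with
    | none => none   -- unreachable: starts always contains index 0, exactly as in Source B
    | some r => PySem.List.pyGet? s (r.1 + PySem.Int.floordiv (r.2 - 1) 2)

-- ===== PRECONDITION & SPEC =====
def Spec_find_middle_of_longest_subarray (subarray : List Int) (out : Option Int) : Prop := out = find_middle_of_longest_subarray_alt subarray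
instance (subarray : List Int) (out : Option Int) : Decidable (Spec_find_middle_of_longest_subarray subarray out) := by unfold Spec_find_middle_of_longest_subarray; infer_instance

-- ===== CLAIM (what is proved, stated in full; the proofs are below) =====
def Claim_equal_find_middle_of_longest_subarray : Prop := ∀ (subarray : List Int), Dom_find_middle_of_longest_subarray subarray → Spec_find_middle_of_longest_subarray subarray (find_middle_of_longest_subarray subarray)

-- ===== LEMMAS AND PROOFS =====

-- An arithmetic block [v, v+1, …, v+L-1]: the elements of one maximal consecutive run.
def blockOf (v : Int) (L : Nat) : List Int := (List.range L).map (fun k : Nat => v + (k : Int))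

-- Decomposition of a list into maximal consecutive (+1) runs, as (start value, length) pairs;
-- (v, len) is the run currently being read.
def runsGo (v : Int) (len : Nat) : List Int → List (Int × Nat)
  | [] => [(v, len)]
  | x :: xs => if x = v + len then runsGo v (len + 1) xs else (v, len) :: runsGo x 1 xs

def runs : List Int → List (Int × Nat)
  | [] => []
  | x :: xs => runsGo x 1 xs

def sumLen (rs : List (Int × Nat)) : Nat := (rs.map (·.2)).sum

-- A's post-loop selection (first run of maximal length) replayed over the run list;
-- b is the start index of the next run.
def finishA : Nat → Nat → Nat → List (Int × Nat) → Nat × Nat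
  | _, maxL, bestI, [] => (maxL, bestI)
  | b, maxL, bestI, (_, L) :: rest =>
      if maxL < L then finishA (b + L) L b rest else finishA (b + L) maxL bestI rest

-- A's loop body and its post-loop max/best selection, as named functions
def bodyA (s : List Int) : (Int × Int × Int × Int) → Int → (Int × Int × Int × Int) := fun st i =>
  if i = 0 ∨ PySem.List.pyGetD s i 0 = PySem.List.pyGetD s (i - 1) 0 + 1 then
    (st.1, st.2.1 + 1, st.2.2.1, st.2.2.2)
  else
    if st.2.1 > st.1 then (st.2.1, 1, i, st.2.2.1)
    else (st.1, 1, i, st.2.2.2)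

def flushA (st : Int × Int × Int × Int) : Int × Int :=
  ((if st.2.1 > st.1 then st.2.1 else st.1),
   (if st.2.1 > st.1 then st.2.2.1 else st.2.2.2))

def loopA (s : List Int) : Int × Int :=
  flushA ((PySem.List.pyRange 0 (PySem.List.len s) 1).foldl (bodyA s) (0, 0, 0, 0))

-- B's boundary predicate, as a named function
def isStart (s : List Int) : Int → Bool := fun i =>
  decide (i = 0 ∨ ¬ PySem.List.pyGetD s i 0 = PySem.List.pyGetD s (i - 1) 0 + 1)

-- start indices of the runs in rs, the first run starting at index b
def startsFrom (b : Nat) : List (Int × Nat) → List Int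
  | [] => []
  | (_, L) :: rest => ((b : Nat) : Int) :: startsFrom (b + L) rest

-- (start index, length) pairs of the runs in rs, as B builds them
def pairsOf (b : Nat) : List (Int × Nat) → List (Int × Int)
  | [] => []
  | (_, L) :: rest => (((b : Nat) : Int), (L : Int)) :: pairsOf (b + L) rest

-- the foldl step of PySem.List.max? with key (·.2) on Int pairs
def maxStep (acc : Option (Int × Int)) (x : Int × Int) : Option (Int × Int) :=
  match acc with
  | none => some x
  | some m => if m.2 < x.2 then some x else some m

lemma blockOf_succ (v : Int) (L : Nat) : blockOf v (L + 1) = blockOf v L ++ [v + L] := by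
  simp [blockOf, List.range_succ]

@[simp] lemma length_blockOf (v : Int) (L : Nat) : (blockOf v L).length = L := by
  simp [blockOf]

@[simp] lemma blockOf_one (v : Int) : blockOf v 1 = [v] := by
  simp [blockOf, List.range_succ]

@[simp] lemma blockOf_zero (v : Int) : blockOf v 0 = [] := by simp [blockOf]

lemma runsGo_flat (l : List Int) : ∀ (v : Int) (len : Nat),
    (runsGo v len l).flatMap (fun r => blockOf r.1 r.2) = blockOf v len ++ l := by
  induction l with
  | nil => intro v len; simp [runsGo]
  | cons x xs ih =>
    intro v len
    by_cases h : x = v + len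
    · simp only [runsGo, if_pos h, ih, blockOf_succ]
      simp [h]
    · simp only [runsGo, if_neg h, List.flatMap_cons, ih]
      simp [List.append_assoc]

lemma runs_flat (l : List Int) : (runs l).flatMap (fun r => blockOf r.1 r.2) = l := by
  cases l with
  | nil => simp [runs]
  | cons x xs => simp [runs, runsGo_flat, blockOf_succ]

lemma runsGo_head (l : List Int) : ∀ (v : Int) (len : Nat),
    ∃ L', len ≤ L' ∧ (runsGo v len l).head? = some (v, L') := by
  induction l with
  | nil => intro v len; exact ⟨len, le_refl _, rfl⟩
  | cons x xs ih =>
    intro v len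
    by_cases h : x = v + len
    · obtain ⟨L', h1, h2⟩ := ih v (len + 1)
      exact ⟨L', by omega, by simp [runsGo, if_pos h, h2]⟩
    · exact ⟨len, le_refl _, by simp [runsGo, if_neg h]⟩

lemma runsGo_len_pos (l : List Int) : ∀ (v : Int) (len : Nat), 1 ≤ len →
    ∀ r ∈ runsGo v len l, 1 ≤ r.2 := by
  induction l with
  | nil => intro v len h r hr; simp [runsGo] at hr; subst hr; exact h
  | cons x xs ih =>
    intro v len h r hr
    by_cases hx : x = v + len
    · exact ih v (len + 1) (by omega) r (by simpa [runsGo, if_pos hx] using hr)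
    · simp only [runsGo, if_neg hx, List.mem_cons] at hr
      rcases hr with rfl | hr
      · exact h
      · exact ih x 1 le_rfl r hr

lemma length_flat (rs : List (Int × Nat)) :
    (rs.flatMap (fun r => blockOf r.1 r.2)).length = sumLen rs := by
  induction rs with
  | nil => simp [sumLen]
  | cons a l ih => simp only [List.flatMap_cons, List.length_append, ih, sumLen, List.map_cons, List.sum_cons, length_blockOf]

lemma sumLen_cons (a : Int × Nat) (l : List (Int × Nat)) : sumLen (a :: l) = a.2 + sumLen l := by
  simp [sumLen]

lemma finishA_spec (rs : List (Int × Nat)) : ∀ (b maxL bestI : Nat), (∀ r ∈ rs, 1 ≤ r.2) →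
    (finishA b maxL bestI rs = (maxL, bestI) ∧ ∀ r ∈ rs, r.2 ≤ maxL)
    ∨ ∃ rs₁ v L rs₂, rs = rs₁ ++ (v, L) :: rs₂
        ∧ finishA b maxL bestI rs = (L, b + sumLen rs₁)
        ∧ maxL < L ∧ (∀ r ∈ rs₁, r.2 < L) ∧ (∀ r ∈ rs₂, r.2 ≤ L) := by
  induction rs with
  | nil => intro b maxL bestI _; left; exact ⟨rfl, by simp⟩
  | cons a l ih =>
    intro b maxL bestI hlen
    obtain ⟨v0, L0⟩ := a
    by_cases h : maxL < L0
    · rcases ih (b + L0) L0 b (fun r hr => hlen r (List.mem_cons_of_mem _ hr)) with ⟨heq, hall⟩ | ⟨rs₁, v, L, rs₂, hdec, heq, hlt, h1, h2⟩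
      · right
        refine ⟨[], v0, L0, l, by simp, ?_, h, by simp, hall⟩
        simp [finishA, if_pos h, heq, sumLen]
      · right
        refine ⟨(v0, L0) :: rs₁, v, L, rs₂, by simp [hdec], ?_, by omega, ?_, h2⟩
        · simp only [finishA, if_pos h, heq, sumLen_cons]
          refine Prod.ext rfl ?_
          simp; omega
        · intro r hr
          rcases List.mem_cons.1 hr with rfl | hr
          · omega
          · exact h1 r hr
    · rcases ih (b + L0) maxL bestI (fun r hr => hlen r (List.mem_cons_of_mem _ hr)) with ⟨heq, hall⟩ | ⟨rs₁, v, L, rs₂, hdec, heq, hlt, h1, h2⟩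
      · left
        refine ⟨by simp [finishA, if_neg h, heq], ?_⟩
        intro r hr
        rcases List.mem_cons.1 hr with rfl | hr
        · omega
        · exact hall r hr
      · right
        refine ⟨(v0, L0) :: rs₁, v, L, rs₂, by simp [hdec], ?_, hlt, ?_, h2⟩
        · simp only [finishA, if_neg h, heq, sumLen_cons]
          refine Prod.ext rfl ?_
          simp; omega
        · intro r hr
          rcases List.mem_cons.1 hr with rfl | hr
          · omega
          · exact h1 r hr

lemma getD_blockOf (v : Int) (L k : Nat) (d : Int) (h : k < L) :
    (blockOf v L).getD k d = v + k := by
  rw [List.getD_eq_getElem?_getD]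
  simp [blockOf, List.getElem?_map, List.getElem?_range h]

lemma foldA_eq (s : List Int) : ∀ (suf pre₀ : List Int) (v : Int) (len maxL bestI : Nat),
    1 ≤ len → s = pre₀ ++ blockOf v len ++ suf →
    flushA
      ((PySem.List.pyRange ((pre₀.length + len : Nat) : Int)
          ((pre₀.length + len + suf.length : Nat) : Int) 1).foldl (bodyA s)
        ((maxL : Int), (len : Int), ((pre₀.length : Nat) : Int), (bestI : Int)))
    = (((finishA pre₀.length maxL bestI (runsGo v len suf)).1 : Int),
       ((finishA pre₀.length maxL bestI (runsGo v len suf)).2 : Int)) := by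
  intro suf
  induction suf with
  | nil =>
    intro pre₀ v len maxL bestI hlen hs
    rw [PySem.List.pyRange_one_eq_nil (by simp)]
    simp only [List.foldl_nil, runsGo]
    by_cases h : maxL < len
    · have h' : ((len : Int) > (maxL : Int)) := by exact_mod_cast h
      simp [flushA, finishA, h, h']
    · have h' : ¬ ((len : Int) > (maxL : Int)) := by exact_mod_cast h
      simp [flushA, finishA, h, h']
  | cons x xs ih =>
    intro pre₀ v len maxL bestI hlen hs
    have ha1 : ((pre₀.length + len : Nat) : Int) < ((pre₀.length + len + (x :: xs).length : Nat) : Int) := by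
      push_cast
      simp only [List.length_cons]
      omega
    rw [PySem.List.pyRange_one_cons ha1, List.foldl_cons]
    have hsa : s = (pre₀ ++ blockOf v len) ++ x :: xs := by
      rw [hs, List.append_assoc]
    have hget1 : PySem.List.pyGetD s ((pre₀.length + len : Nat) : Int) 0 = x := by
      rw [PySem.List.pyGetD_natCast, hsa,
        List.getD_append_right _ _ _ _ (by simp)]
      simp
    have hget2 : PySem.List.pyGetD s (((pre₀.length + len : Nat) : Int) - 1) 0 = v + ((len : Int) - 1) := by
      have hcast : (((pre₀.length + len : Nat) : Int) - 1) = ((pre₀.length + (len - 1) : Nat) : Int) := by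
        push_cast; omega
      rw [hcast, PySem.List.pyGetD_natCast, hsa,
        List.getD_append _ _ _ _ (by simp; omega),
        List.getD_append_right _ _ _ _ (by omega)]
      have : pre₀.length + (len - 1) - pre₀.length = len - 1 := by omega
      rw [this, getD_blockOf _ _ _ _ (by omega)]
      omega
    have hne0 : ¬ (((pre₀.length + len : Nat) : Int) = 0) := by
      push_cast; omega
    by_cases hx : x = v + (len : Int)
    · have hcond : (((pre₀.length + len : Nat) : Int) = 0
          ∨ PySem.List.pyGetD s ((pre₀.length + len : Nat) : Int) 0
            = PySem.List.pyGetD s (((pre₀.length + len : Nat) : Int) - 1) 0 + 1) := by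
        right; rw [hget1, hget2]; omega
      have hstep : bodyA s ((maxL : Int), (len : Int), ((pre₀.length : Nat) : Int), (bestI : Int)) ((pre₀.length + len : Nat) : Int)
          = ((maxL : Int), (len : Int) + 1, ((pre₀.length : Nat) : Int), (bestI : Int)) := by
        simp only [bodyA, if_pos hcond]
      rw [hstep]
      have hs' : s = pre₀ ++ blockOf v (len + 1) ++ xs := by
        rw [hs, blockOf_succ, hx]
        simp [List.append_assoc]
      have := ih pre₀ v (len + 1) maxL bestI (by omega) hs'
      have harg1 : ((pre₀.length + (len + 1) : Nat) : Int) = ((pre₀.length + len : Nat) : Int) + 1 := by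
        push_cast; ring
      have harg2 : ((pre₀.length + (len + 1) + xs.length : Nat) : Int) = ((pre₀.length + len + (x :: xs).length : Nat) : Int) := by
        simp; omega
      have harg3 : ((len + 1 : Nat) : Int) = (len : Int) + 1 := by push_cast; ring
      rw [harg1, harg2, harg3] at this
      rw [runsGo, if_pos hx]
      exact this
    · have hcond : ¬ (((pre₀.length + len : Nat) : Int) = 0
          ∨ PySem.List.pyGetD s ((pre₀.length + len : Nat) : Int) 0
            = PySem.List.pyGetD s (((pre₀.length + len : Nat) : Int) - 1) 0 + 1) := by
        rintro (h | h)
        · exact hne0 h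
        · rw [hget1, hget2] at h; apply hx; omega
      have hs' : s = (pre₀ ++ blockOf v len) ++ blockOf x 1 ++ xs := by
        rw [hs]; simp [List.append_assoc]
      rw [runsGo, if_neg hx]
      by_cases hm : maxL < len
      · have hstep : bodyA s ((maxL : Int), (len : Int), ((pre₀.length : Nat) : Int), (bestI : Int)) ((pre₀.length + len : Nat) : Int)
            = ((len : Int), 1, ((pre₀.length + len : Nat) : Int), ((pre₀.length : Nat) : Int)) := by
          have hm' : ((len : Int) > (maxL : Int)) := by exact_mod_cast hm
          simp only [bodyA, if_neg hcond, if_pos hm']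
        rw [hstep]
        have := ih (pre₀ ++ blockOf v len) x 1 len pre₀.length le_rfl hs'
        simp only [List.length_append, length_blockOf] at this
        have harg : ((pre₀.length + len + 1 : Nat) : Int) = ((pre₀.length + len : Nat) : Int) + 1 := by push_cast; ring
        have harg2 : ((pre₀.length + len + 1 + xs.length : Nat) : Int) = ((pre₀.length + len + (x :: xs).length : Nat) : Int) := by simp; omega
        rw [harg, harg2] at this
        simp only [Nat.cast_one] at this
        rw [this]
        have : finishA pre₀.length maxL bestI ((v, len) :: runsGo x 1 xs)
            = finishA (pre₀.length + len) len pre₀.length (runsGo x 1 xs) := by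
          simp [finishA, if_pos hm]
        rw [this]
      · have hstep : bodyA s ((maxL : Int), (len : Int), ((pre₀.length : Nat) : Int), (bestI : Int)) ((pre₀.length + len : Nat) : Int)
            = ((maxL : Int), 1, ((pre₀.length + len : Nat) : Int), (bestI : Int)) := by
          have hm' : ¬ ((len : Int) > (maxL : Int)) := by exact_mod_cast hm
          simp only [bodyA, if_neg hcond, if_neg hm']
        rw [hstep]
        have := ih (pre₀ ++ blockOf v len) x 1 maxL bestI le_rfl hs'
        simp only [List.length_append, length_blockOf] at this
        have harg : ((pre₀.length + len + 1 : Nat) : Int) = ((pre₀.length + len : Nat) : Int) + 1 := by push_cast; ring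
        have harg2 : ((pre₀.length + len + 1 + xs.length : Nat) : Int) = ((pre₀.length + len + (x :: xs).length : Nat) : Int) := by simp; omega
        rw [harg, harg2] at this
        simp only [Nat.cast_one] at this
        rw [this]
        have : finishA pre₀.length maxL bestI ((v, len) :: runsGo x 1 xs)
            = finishA (pre₀.length + len) maxL bestI (runsGo x 1 xs) := by
          simp [finishA, if_neg hm]
        rw [this]

lemma portA_eq (subarray : List Int) (h : ¬ subarray = []) :
    find_middle_of_longest_subarray subarray =
      PySem.List.pyGet?
        (PySem.List.slice (PySem.List.sorted subarray (fun x => x) false)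
          (some (loopA (PySem.List.sorted subarray (fun x => x) false)).2)
          (some ((loopA (PySem.List.sorted subarray (fun x => x) false)).2
                 + (loopA (PySem.List.sorted subarray (fun x => x) false)).1)))
        (PySem.Int.floordiv
          (PySem.List.len
            (PySem.List.slice (PySem.List.sorted subarray (fun x => x) false)
              (some (loopA (PySem.List.sorted subarray (fun x => x) false)).2)
              (some ((loopA (PySem.List.sorted subarray (fun x => x) false)).2
                     + (loopA (PySem.List.sorted subarray (fun x => x) false)).1))) - 1) 2) := by
  rw [find_middle_of_longest_subarray, if_neg h]
  rfl

lemma getElem?_blockOf (v : Int) (L k : Nat) (h : k < L) :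
    (blockOf v L)[k]? = some (v + (k : Int)) := by
  simp [blockOf, List.getElem?_map, List.getElem?_range h]

lemma A_char (subarray : List Int) (h : subarray ≠ [])
    (rs₁ rs₂ : List (Int × Nat)) (v : Int) (L : Nat)
    (hdec : runs (PySem.List.sorted subarray (fun x => x) false) = rs₁ ++ (v, L) :: rs₂)
    (hfin : finishA 0 0 0 (runs (PySem.List.sorted subarray (fun x => x) false)) = (L, sumLen rs₁))
    (hL : 1 ≤ L) :
    find_middle_of_longest_subarray subarray = some (v + (((L - 1) / 2 : Nat) : Int)) := by
  rw [portA_eq subarray h]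
  set s := PySem.List.sorted subarray (fun x => x) false with hsdef
  obtain ⟨hh, t, hst⟩ : ∃ hh t, s = hh :: t := by
    rcases hs0 : s with _ | ⟨hh, t⟩
    · exfalso; exact h ((PySem.List.sorted_eq_nil_iff subarray _ false).1 (hsdef ▸ hs0))
    · exact ⟨hh, t, rfl⟩
  have hflush : loopA s = ((L : Int), ((sumLen rs₁ : Nat) : Int)) := by
    rw [loopA]
    have hlen0 : PySem.List.len s = ((t.length + 1 : Nat) : Int) := by
      rw [PySem.List.len_eq, hst]; simp
    have hpos : (0 : Int) < ((t.length + 1 : Nat) : Int) := by positivity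
    rw [hlen0, PySem.List.pyRange_one_cons hpos, List.foldl_cons]
    have hstep : bodyA s (0, 0, 0, 0) 0 = (0, 1, 0, 0) := by simp [bodyA]
    rw [hstep]
    have hs' : s = [] ++ blockOf hh 1 ++ t := by simpa using hst
    have hfold := foldA_eq s t [] hh 1 0 0 le_rfl hs'
    simp only [List.length_nil, Nat.zero_add, Nat.cast_zero, Nat.cast_one] at hfold
    have : runs s = runsGo hh 1 t := by rw [hst]; rfl
    rw [this] at hdec hfin
    have e1 : ((0:Int) + 1) = 1 := by norm_num
    have e2 : ((t.length + 1 : Nat) : Int) = ((1 + t.length : Nat) : Int) := by omega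
    rw [e1, e2, hfold, hfin]
  rw [hflush]
  have hs2 : s = (rs₁.flatMap (fun r => blockOf r.1 r.2)) ++ (blockOf v L ++ (rs₂.flatMap (fun r => blockOf r.1 r.2))) := by
    conv_lhs => rw [← runs_flat s]
    rw [hdec]
    simp [List.flatMap_append]
  have hF1 : (rs₁.flatMap (fun r => blockOf r.1 r.2)).length = sumLen rs₁ := length_flat rs₁
  have hslice : PySem.List.slice s (some ((sumLen rs₁ : Nat) : Int))
      (some (((sumLen rs₁ : Nat) : Int) + (L : Int))) = blockOf v L := by
    rw [PySem.List.slice_natCast_add s (sumLen rs₁) L, hs2, ← hF1, List.drop_left, List.take_left']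
    simp
  simp only []
  rw [hslice]
  have hlen2 : PySem.List.len (blockOf v L) = (L : Int) := by
    rw [PySem.List.len_eq]; simp
  rw [hlen2]
  have hdiv : PySem.Int.floordiv ((L : Int) - 1) 2 = (((L - 1) / 2 : Nat) : Int) := by
    have : ((L : Int) - 1) = (((L - 1 : Nat) : Nat) : Int) := by omega
    rw [this]
    exact_mod_cast PySem.Int.floordiv_natCast (L - 1) 2
  rw [hdiv, PySem.List.pyGet?_natCast]
  exact getElem?_blockOf v L ((L - 1) / 2) (by omega)

-- ===== B-side lemmas =====

lemma portB_eq (subarray : List Int) (h : ¬ subarray = []) :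
    find_middle_of_longest_subarray_alt subarray =
      (match PySem.List.max?
          ((PySem.List.pyRange 0
            (PySem.List.len ((PySem.List.pyRange 0 (PySem.List.len (PySem.List.sorted subarray (fun x => x) false)) 1).filter
              (isStart (PySem.List.sorted subarray (fun x => x) false)))) 1).map
            (fun k =>
              (PySem.List.pyGetD (((PySem.List.pyRange 0 (PySem.List.len (PySem.List.sorted subarray (fun x => x) false)) 1).filter
                  (isStart (PySem.List.sorted subarray (fun x => x) false))) ++ [PySem.List.len (PySem.List.sorted subarray (fun x => x) false)]) k 0,
               PySem.List.pyGetD (((PySem.List.pyRange 0 (PySem.List.len (PySem.List.sorted subarray (fun x => x) false)) 1).filter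
                  (isStart (PySem.List.sorted subarray (fun x => x) false))) ++ [PySem.List.len (PySem.List.sorted subarray (fun x => x) false)]) (k + 1) 0
               - PySem.List.pyGetD (((PySem.List.pyRange 0 (PySem.List.len (PySem.List.sorted subarray (fun x => x) false)) 1).filter
                  (isStart (PySem.List.sorted subarray (fun x => x) false))) ++ [PySem.List.len (PySem.List.sorted subarray (fun x => x) false)]) k 0)))
          (fun run => run.2) with
      | none => none
      | some r => PySem.List.pyGet? (PySem.List.sorted subarray (fun x => x) false) (r.1 + PySem.Int.floordiv (r.2 - 1) 2)) := by
  rw [find_middle_of_longest_subarray_alt, if_neg h]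
  rfl

lemma max?_eq_foldl (l : List (Int × Int)) :
    PySem.List.max? l (fun r => r.2) = l.foldl maxStep none := by
  unfold PySem.List.max?
  congr 1
  funext acc x
  cases acc <;> rfl

lemma foldl_maxStep_keep (l : List (Int × Int)) : ∀ (m : Int × Int), (∀ p ∈ l, ¬ m.2 < p.2) →
    l.foldl maxStep (some m) = some m := by
  induction l with
  | nil => intro m _; rfl
  | cons x xs ih =>
    intro m hm
    have hx : ¬ m.2 < x.2 := hm x List.mem_cons_self
    simp only [List.foldl_cons, maxStep, if_neg hx]
    exact ih m (fun p hp => hm p (List.mem_cons_of_mem _ hp))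

lemma max?_split (l₁ l₂ : List (Int × Int)) (e : Int × Int)
    (h1 : ∀ p ∈ l₁, p.2 < e.2) (h2 : ∀ p ∈ l₂, p.2 ≤ e.2) :
    PySem.List.max? (l₁ ++ e :: l₂) (fun r => r.2) = some e := by
  rw [max?_eq_foldl, List.foldl_append]
  have hstep : (l₁.foldl maxStep none).bind (fun _ => some ()) = (l₁.foldl maxStep none).bind (fun _ => some ()) := rfl
  rcases hfold : l₁.foldl maxStep none with _ | m
  · simp only [List.foldl_cons, maxStep]
    exact foldl_maxStep_keep l₂ e (fun p hp => by have := h2 p hp; omega)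
  · have hmem : m ∈ l₁ := by
      have : PySem.List.max? l₁ (fun r => r.2) = some m := by rw [max?_eq_foldl, hfold]
      exact PySem.List.max?_mem this
    have hlt : m.2 < e.2 := h1 m hmem
    simp only [List.foldl_cons, maxStep, if_pos hlt]
    exact foldl_maxStep_keep l₂ e (fun p hp => by have := h2 p hp; omega)

@[simp] lemma length_startsFrom (b : Nat) (rs : List (Int × Nat)) :
    (startsFrom b rs).length = rs.length := by
  induction rs generalizing b with
  | nil => rfl
  | cons a l ih => obtain ⟨v, L⟩ := a; simp [startsFrom, ih]

lemma getD_bounds (rs : List (Int × Nat)) : ∀ (b k : Nat), k ≤ rs.length →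
    (startsFrom b rs ++ [((b + sumLen rs : Nat) : Int)]).getD k 0
      = ((b + sumLen (rs.take k) : Nat) : Int) := by
  induction rs with
  | nil =>
    intro b k hk
    have hk0 : k = 0 := by simpa using hk
    subst hk0
    simp [startsFrom, sumLen]
  | cons a l ih =>
    intro b k hk
    obtain ⟨v, L⟩ := a
    cases k with
    | zero => simp [startsFrom, sumLen]
    | succ k' =>
      have harr : ((b + sumLen ((v, L) :: l) : Nat) : Int) = (((b + L) + sumLen l : Nat) : Int) := by
        rw [sumLen_cons]; push_cast; ring_nf
      simp only [startsFrom, List.cons_append, List.getD_cons_succ]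
      rw [harr, ih (b + L) k' (by simpa using hk)]
      rw [List.take_succ_cons, sumLen_cons]
      push_cast
      ring

lemma sumLen_take_succ (rs : List (Int × Nat)) (k : Nat) (hk : k < rs.length) :
    sumLen (rs.take (k + 1)) = sumLen (rs.take k) + (rs.get ⟨k, hk⟩).2 := by
  induction rs generalizing k with
  | nil => simp at hk
  | cons a l ih =>
    cases k with
    | zero => simp [sumLen]
    | succ k' =>
      simp only [List.take_succ_cons, sumLen_cons]
      rw [ih k' (by simpa using hk)]
      simp only [List.get_eq_getElem, List.getElem_cons_succ]
      omega

lemma getElem?_pairsOf (rs : List (Int × Nat)) : ∀ (b k : Nat) (hk : k < rs.length),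
    (pairsOf b rs)[k]? = some (((b + sumLen (rs.take k) : Nat) : Int), ((rs.get ⟨k, hk⟩).2 : Int)) := by
  induction rs with
  | nil => intro b k hk; simp at hk
  | cons a l ih =>
    intro b k hk
    obtain ⟨v, L⟩ := a
    cases k with
    | zero => simp [pairsOf, sumLen]
    | succ k' =>
      simp only [pairsOf, List.getElem?_cons_succ]
      rw [ih (b + L) k' (by simpa using hk)]
      simp only [List.take_succ_cons, sumLen_cons, List.get]
      congr 2
      omega

@[simp] lemma length_pairsOf (b : Nat) (rs : List (Int × Nat)) :
    (pairsOf b rs).length = rs.length := by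
  induction rs generalizing b with
  | nil => rfl
  | cons a l ih => obtain ⟨v, L⟩ := a; simp [pairsOf, ih]

lemma pairsOf_append (l₁ l₂ : List (Int × Nat)) : ∀ (b : Nat),
    pairsOf b (l₁ ++ l₂) = pairsOf b l₁ ++ pairsOf (b + sumLen l₁) l₂ := by
  induction l₁ with
  | nil => intro b; simp [pairsOf, sumLen]
  | cons a l ih =>
    intro b
    obtain ⟨v, L⟩ := a
    simp only [List.cons_append, pairsOf, ih, sumLen_cons]
    have e : b + L + sumLen l = b + (L + sumLen l) := by omega
    rw [e]

lemma mem_pairsOf_snd (rs : List (Int × Nat)) : ∀ (b : Nat) (p : Int × Int), p ∈ pairsOf b rs →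
    ∃ r ∈ rs, p.2 = (r.2 : Int) := by
  induction rs with
  | nil => intro b p hp; simp [pairsOf] at hp
  | cons a l ih =>
    intro b p hp
    obtain ⟨v, L⟩ := a
    simp only [pairsOf, List.mem_cons] at hp
    rcases hp with rfl | hp
    · exact ⟨(v, L), List.mem_cons_self, rfl⟩
    · obtain ⟨r, hr, he⟩ := ih (b + L) p hp
      exact ⟨r, List.mem_cons_of_mem _ hr, he⟩

-- the filtered index range of B, over the runs decomposition
lemma filt_eq (s : List Int) : ∀ (suf pre₀ : List Int) (v : Int) (len : Nat), 1 ≤ len →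
    s = pre₀ ++ blockOf v len ++ suf →
    (PySem.List.pyRange ((pre₀.length + len : Nat) : Int) ((pre₀.length + len + suf.length : Nat) : Int) 1).filter (isStart s)
      = (startsFrom pre₀.length (runsGo v len suf)).tail := by
  intro suf
  induction suf with
  | nil =>
    intro pre₀ v len _ _
    rw [PySem.List.pyRange_one_eq_nil (by simp)]
    simp [runsGo, startsFrom]
  | cons x xs ih =>
    intro pre₀ v len hlen hs
    have ha1 : ((pre₀.length + len : Nat) : Int) < ((pre₀.length + len + (x :: xs).length : Nat) : Int) := by
      push_cast; simp only [List.length_cons]; omega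
    rw [PySem.List.pyRange_one_cons ha1, List.filter_cons]
    have hsa : s = (pre₀ ++ blockOf v len) ++ x :: xs := by rw [hs, List.append_assoc]
    have hget1 : PySem.List.pyGetD s ((pre₀.length + len : Nat) : Int) 0 = x := by
      rw [PySem.List.pyGetD_natCast, hsa, List.getD_append_right _ _ _ _ (by simp)]
      simp
    have hget2 : PySem.List.pyGetD s (((pre₀.length + len : Nat) : Int) - 1) 0 = v + ((len : Int) - 1) := by
      have hcast : (((pre₀.length + len : Nat) : Int) - 1) = ((pre₀.length + (len - 1) : Nat) : Int) := by
        push_cast; omega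
      rw [hcast, PySem.List.pyGetD_natCast, hsa,
        List.getD_append _ _ _ _ (by simp; omega),
        List.getD_append_right _ _ _ _ (by omega)]
      have : pre₀.length + (len - 1) - pre₀.length = len - 1 := by omega
      rw [this, getD_blockOf _ _ _ _ (by omega)]
      omega
    have hne0 : ¬ (((pre₀.length + len : Nat) : Int) = 0) := by push_cast; omega
    by_cases hx : x = v + (len : Int)
    · have hP : isStart s ((pre₀.length + len : Nat) : Int) = false := by
        simp only [isStart, decide_eq_false_iff_not, not_or, not_not]
        exact ⟨hne0, by rw [hget1, hget2]; omega⟩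
      rw [hP, if_neg (by simp)]
      have hs' : s = pre₀ ++ blockOf v (len + 1) ++ xs := by
        rw [hs, blockOf_succ, hx]; simp [List.append_assoc]
      have := ih pre₀ v (len + 1) (by omega) hs'
      have harg1 : ((pre₀.length + (len + 1) : Nat) : Int) = ((pre₀.length + len : Nat) : Int) + 1 := by
        push_cast; ring
      have harg2 : ((pre₀.length + (len + 1) + xs.length : Nat) : Int) = ((pre₀.length + len + (x :: xs).length : Nat) : Int) := by
        simp; omega
      rw [harg1, harg2] at this
      rw [this, runsGo, if_pos hx]
    · have hP : isStart s ((pre₀.length + len : Nat) : Int) = true := by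
        simp only [isStart, decide_eq_true_eq]
        right
        rw [hget1, hget2]
        intro hc; apply hx; omega
      rw [hP, if_pos rfl]
      have hs' : s = (pre₀ ++ blockOf v len) ++ blockOf x 1 ++ xs := by
        rw [hs]; simp [List.append_assoc]
      have := ih (pre₀ ++ blockOf v len) x 1 le_rfl hs'
      simp only [List.length_append, length_blockOf] at this
      have harg : ((pre₀.length + len + 1 : Nat) : Int) = ((pre₀.length + len : Nat) : Int) + 1 := by push_cast; ring
      have harg2 : ((pre₀.length + len + 1 + xs.length : Nat) : Int) = ((pre₀.length + len + (x :: xs).length : Nat) : Int) := by simp; omega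
      rw [harg, harg2] at this
      rw [this, runsGo, if_neg hx]
      obtain ⟨L', _, hhd⟩ := runsGo_head xs x 1
      obtain ⟨rest, hrg⟩ : ∃ rest, runsGo x 1 xs = (x, L') :: rest := by
        rcases h0 : runsGo x 1 xs with _ | ⟨hd, rest⟩
        · rw [h0] at hhd; cases hhd
        · rw [h0] at hhd
          simp only [List.head?_cons, Option.some.injEq] at hhd
          exact ⟨rest, by rw [hhd]⟩
      rw [hrg]
      simp [startsFrom]

lemma starts_eq (subarray : List Int) (hh : Int) (t : List Int)
    (hst : PySem.List.sorted subarray (fun x => x) false = hh :: t) :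
    (PySem.List.pyRange 0 (PySem.List.len (PySem.List.sorted subarray (fun x => x) false)) 1).filter
      (isStart (PySem.List.sorted subarray (fun x => x) false))
    = startsFrom 0 (runs (PySem.List.sorted subarray (fun x => x) false)) := by
  set s := PySem.List.sorted subarray (fun x => x) false with hsdef
  have hlen0 : PySem.List.len s = ((t.length + 1 : Nat) : Int) := by
    rw [PySem.List.len_eq, hst]; simp
  have hpos : (0 : Int) < ((t.length + 1 : Nat) : Int) := by positivity
  rw [hlen0, PySem.List.pyRange_one_cons hpos, List.filter_cons]
  have hP0 : isStart s 0 = true := by simp [isStart]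
  rw [hP0, if_pos rfl]
  have hs' : s = [] ++ blockOf hh 1 ++ t := by simpa using hst
  have hfe := filt_eq s t [] hh 1 le_rfl hs'
  simp only [List.length_nil, Nat.zero_add, Nat.cast_one] at hfe
  have e1 : ((0:Int) + 1) = 1 := by norm_num
  have e2 : t.length + 1 = 1 + t.length := by omega
  rw [e1, e2, hfe]
  have hruns : runs s = runsGo hh 1 t := by rw [hst]; rfl
  rw [hruns]
  obtain ⟨L', _, hhd⟩ := runsGo_head t hh 1
  obtain ⟨rest, hrg⟩ : ∃ rest, runsGo hh 1 t = (hh, L') :: rest := by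
    rcases h0 : runsGo hh 1 t with _ | ⟨hd, rest⟩
    · rw [h0] at hhd; cases hhd
    · rw [h0] at hhd
      simp only [List.head?_cons, Option.some.injEq] at hhd
      exact ⟨rest, by rw [hhd]⟩
  rw [hrg]
  simp [startsFrom]

lemma runsList_eq (s : List Int) (rs : List (Int × Nat))
    (hflat : rs.flatMap (fun r => blockOf r.1 r.2) = s) :
    ((PySem.List.pyRange 0 (PySem.List.len (startsFrom 0 rs)) 1).map
      (fun k =>
        (PySem.List.pyGetD (startsFrom 0 rs ++ [PySem.List.len s]) k 0,
         PySem.List.pyGetD (startsFrom 0 rs ++ [PySem.List.len s]) (k + 1) 0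
         - PySem.List.pyGetD (startsFrom 0 rs ++ [PySem.List.len s]) k 0)))
    = pairsOf 0 rs := by
  have hn : PySem.List.len s = ((0 + sumLen rs : Nat) : Int) := by
    rw [PySem.List.len_eq, ← hflat, length_flat]
    norm_num
  have hm : PySem.List.len (startsFrom 0 rs) = ((rs.length : Nat) : Int) := by
    rw [PySem.List.len_eq, length_startsFrom]
  rw [hn, hm]
  apply List.ext_getElem?
  intro k
  by_cases hk : k < rs.length
  · rw [PySem.List.getElem?_map_pyRange_zero _ _ _ hk, getElem?_pairsOf rs 0 k hk]
    have hb1 : PySem.List.pyGetD (startsFrom 0 rs ++ [((0 + sumLen rs : Nat) : Int)]) ((k : Nat) : Int) 0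
        = ((0 + sumLen (rs.take k) : Nat) : Int) := by
      rw [PySem.List.pyGetD_natCast]
      exact getD_bounds rs 0 k (by omega)
    have hb2 : PySem.List.pyGetD (startsFrom 0 rs ++ [((0 + sumLen rs : Nat) : Int)]) (((k : Nat) : Int) + 1) 0
        = ((0 + sumLen (rs.take (k + 1)) : Nat) : Int) := by
      have : (((k : Nat) : Int) + 1) = (((k + 1 : Nat) : Nat) : Int) := by push_cast; ring
      rw [this, PySem.List.pyGetD_natCast]
      exact getD_bounds rs 0 (k + 1) (by omega)
    rw [hb1, hb2]
    rw [sumLen_take_succ rs k hk]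
    simp only [Option.some.injEq, Prod.mk.injEq]
    constructor
    · norm_num
    · push_cast; ring
  · rw [List.getElem?_eq_none, List.getElem?_eq_none]
    · simpa using (by omega : ¬ k < rs.length)
    · rw [List.length_map, PySem.List.length_pyRange_one]
      simpa using (by omega : ¬ k < rs.length)

lemma B_char (subarray : List Int) (h : subarray ≠ [])
    (rs₁ rs₂ : List (Int × Nat)) (v : Int) (L : Nat)
    (hdec : runs (PySem.List.sorted subarray (fun x => x) false) = rs₁ ++ (v, L) :: rs₂)
    (hmax1 : ∀ r ∈ rs₁, r.2 < L) (hmax2 : ∀ r ∈ rs₂, r.2 ≤ L)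
    (hL : 1 ≤ L) :
    find_middle_of_longest_subarray_alt subarray = some (v + (((L - 1) / 2 : Nat) : Int)) := by
  rw [portB_eq subarray h]
  set s := PySem.List.sorted subarray (fun x => x) false with hsdef
  obtain ⟨hh, t, hst⟩ : ∃ hh t, s = hh :: t := by
    rcases hs0 : s with _ | ⟨hh, t⟩
    · exfalso; exact h ((PySem.List.sorted_eq_nil_iff subarray _ false).1 (hsdef ▸ hs0))
    · exact ⟨hh, t, rfl⟩
  have hflat : (rs₁ ++ (v, L) :: rs₂).flatMap (fun r => blockOf r.1 r.2) = s := by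
    rw [← hdec]; exact runs_flat s
  have hstarts := starts_eq subarray hh t (hsdef ▸ hst)
  rw [← hsdef] at hstarts
  rw [hstarts, hdec]
  rw [runsList_eq s (rs₁ ++ (v, L) :: rs₂) hflat]
  rw [pairsOf_append]
  simp only [pairsOf, Nat.zero_add]
  have hsplit := max?_split (pairsOf 0 rs₁) (pairsOf (sumLen rs₁ + L) rs₂)
      (((sumLen rs₁ : Nat) : Int), (L : Int))
      (by
        intro p hp
        obtain ⟨r, hr, he⟩ := mem_pairsOf_snd rs₁ 0 p hp
        have := hmax1 r hr
        simp only [he]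
        exact_mod_cast this)
      (by
        intro p hp
        obtain ⟨r, hr, he⟩ := mem_pairsOf_snd rs₂ (sumLen rs₁ + L) p hp
        have := hmax2 r hr
        simp only [he]
        exact_mod_cast this)
  rw [hsplit]
  simp only []
  have hdiv : PySem.Int.floordiv ((L : Int) - 1) 2 = (((L - 1) / 2 : Nat) : Int) := by
    have : ((L : Int) - 1) = (((L - 1 : Nat) : Nat) : Int) := by omega
    rw [this]
    exact_mod_cast PySem.Int.floordiv_natCast (L - 1) 2
  rw [hdiv]
  have hidx : ((sumLen rs₁ : Nat) : Int) + (((L - 1) / 2 : Nat) : Int)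
      = (((sumLen rs₁ + (L - 1) / 2 : Nat) : Nat) : Int) := by push_cast; ring
  rw [hidx, PySem.List.pyGet?_natCast]
  have hs2 : s = (rs₁.flatMap (fun r => blockOf r.1 r.2)) ++ (blockOf v L ++ (rs₂.flatMap (fun r => blockOf r.1 r.2))) := by
    conv_lhs => rw [← hflat]
    simp [List.flatMap_append]
  have hF1 : (rs₁.flatMap (fun r => blockOf r.1 r.2)).length = sumLen rs₁ := length_flat rs₁
  rw [hs2, List.getElem?_append_right (by omega)]
  rw [hF1]
  have : sumLen rs₁ + (L - 1) / 2 - sumLen rs₁ = (L - 1) / 2 := by omega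
  rw [this, List.getElem?_append_left (by simp; omega)]
  exact getElem?_blockOf v L ((L - 1) / 2) (by omega)

-- ===== VERDICT (by name: the statement is the Claim_ definition above) =====
theorem find_middle_of_longest_subarray_spec : Claim_equal_find_middle_of_longest_subarray := by
  intro subarray _
  unfold Spec_find_middle_of_longest_subarray
  by_cases h : subarray = []
  · rw [find_middle_of_longest_subarray, find_middle_of_longest_subarray_alt, if_pos h, if_pos h]
  · have hlen : ∀ r ∈ runs (PySem.List.sorted subarray (fun x => x) false), 1 ≤ r.2 := by
      rcases hs0 : PySem.List.sorted subarray (fun x => x) false with _ | ⟨hh, t⟩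
      · intro r hr; simp [runs] at hr
      · intro r hr
        exact runsGo_len_pos t hh 1 le_rfl r (by simpa [runs] using hr)
    have hne : runs (PySem.List.sorted subarray (fun x => x) false) ≠ [] := by
      obtain ⟨hh, t, hst⟩ : ∃ hh t, PySem.List.sorted subarray (fun x => x) false = hh :: t := by
        rcases hs0 : PySem.List.sorted subarray (fun x => x) false with _ | ⟨hh, t⟩
        · exact absurd ((PySem.List.sorted_eq_nil_iff subarray _ false).1 hs0) h
        · exact ⟨hh, t, rfl⟩
      rw [hst]
      show runsGo hh 1 t ≠ []
      obtain ⟨L', _, hhd⟩ := runsGo_head t hh 1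
      intro hc
      rw [hc] at hhd
      cases hhd
    rcases finishA_spec (runs (PySem.List.sorted subarray (fun x => x) false)) 0 0 0 hlen with
      ⟨_, hall⟩ | ⟨rs₁, v, L, rs₂, hdec, hfin, hpos, hmax1, hmax2⟩
    · exfalso
      obtain ⟨r, hr⟩ := List.exists_mem_of_ne_nil _ hne
      have h1 := hall r hr
      have h2 := hlen r hr
      omega
    · have hL : 1 ≤ L := by omega
      rw [A_char subarray h rs₁ rs₂ v L hdec (by rw [hfin]; simp) hL,
        B_char subarray h rs₁ rs₂ v L hdec hmax1 hmax2 hL]
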